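-- pv_equiv track=rewrite | github.com/anina512/ml-gpu-scheduler-and-cloud-partitioner | ml-gpu-scheduler/greedy_gpu_budget_experiments.py | brute_force_max_count
-- ===== SOURCE A (Python) =====
-- from itertools import combinations
-- from typing import List, Tuple
--
-- def brute_force_max_count(durations: List[int], budget: int) -> Tuple[int, List[int]]:
--     """
--     Brute force search: returns true optimum on small instances.
--
--     Tries subsets in decreasing size; stops once a feasible subset is found.
--     Intended only for small n (e.g., n<=20) due to 2^n scaling.
--     """
--     n = len(durations)
--     # Try larger cardinalities first to short-circuit early on success
--     for k in range(n, -1, -1):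
--         for comb in combinations(range(n), k):
--             s = sum(durations[i] for i in comb)
--             if s <= budget:
--                 return k, list(comb)
--     return 0, []
-- ===== SOURCE B (Python) =====
-- def brute_force_max_count(durations, budget):
--     """Sort-based exact algorithm: the maximum feasible cardinality k is the
--     largest m whose m smallest durations fit the budget; the lex-first index
--     combination of size k is then built greedily left to right, keeping an
--     index exactly when the cheapest completion from the remaining suffix
--     still fits the budget.  Avoids enumerating the 2^n subsets."""
--     n = len(durations)
--     sums = [0]
--     pre = 0
--     for d in sorted(durations):
--         pre += d
--         sums.append(pre)
--     k = 0
--     for m in range(n, -1, -1):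
--         if sums[m] <= budget:
--             k = m
--             break
--     if k == 0:
--         return 0, []
--     chosen = []
--     total = 0
--     need = k
--     i = 0
--     suffix = durations
--     while suffix and need > 0:
--         d, suffix = suffix[0], suffix[1:]
--         if total + d + sum(sorted(suffix)[:need - 1]) <= budget:
--             chosen.append(i)
--             total += d
--             need -= 1
--         i += 1
--     return k, chosen
-- ===== Notes on version B (the rewrite author's own statement) =====
-- stated objective: alternative
-- what changed: Replaces the 2^n enumeration of index subsets by sorting: the maximal feasible cardinality k is the largest m whose m smallest durations sum within budget (read off prefix sums of the sorted list), and the lex-first k-combination is then built in one greedy left-to-right pass that keeps an index iff it still admits a cheapest completion from the remaining suffix; worst-case polynomial, but not measured faster on the random timing inputs (where A short-circuits early).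
import Mathlib
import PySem

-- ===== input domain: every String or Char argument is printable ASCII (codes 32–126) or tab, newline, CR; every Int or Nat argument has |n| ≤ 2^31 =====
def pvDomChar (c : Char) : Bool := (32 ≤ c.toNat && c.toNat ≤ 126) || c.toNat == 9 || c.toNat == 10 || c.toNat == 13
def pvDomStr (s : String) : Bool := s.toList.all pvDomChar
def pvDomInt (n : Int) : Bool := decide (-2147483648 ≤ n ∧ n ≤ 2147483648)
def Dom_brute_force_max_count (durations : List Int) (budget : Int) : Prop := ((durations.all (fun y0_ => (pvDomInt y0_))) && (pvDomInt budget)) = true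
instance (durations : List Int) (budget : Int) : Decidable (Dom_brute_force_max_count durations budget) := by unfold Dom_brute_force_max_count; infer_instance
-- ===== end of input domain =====

-- B replaces A's 2^n subset enumeration by sorting: the maximal cardinality is read off
-- prefix sums of the sorted list, and the lex-first combination is built by one greedy
-- left-to-right pass with cheapest-completion checks (objective: alternative algorithm).

-- ===== PORT A =====
-- itertools.combinations(l, k), in itertools' lexicographic order
def pvCombos {α : Type} : List α → Nat → List (List α)
  | _, 0 => [[]]
  | [], _ + 1 => []
  | x :: xs, k + 1 => (pvCombos xs k).map (fun c => x :: c) ++ pvCombos xs (k + 1)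

-- sum(durations[i] for i in comb); every i comes from range(n), so it is in range
def pvSumAt (durations : List Int) (c : List Int) : Int :=
  (c.map (fun i => PySem.List.pyGetD durations i 0)).sum

-- the inner 'for comb in combinations(range(n), k): if s <= budget: return'
def pvFindK (durations : List Int) (budget : Int) (k : Nat) : Option (List Int) :=
  (pvCombos (PySem.List.pyRange 0 (durations.length : Int) 1) k).find?
    (fun c => decide (pvSumAt durations c ≤ budget))

-- the outer 'for k in range(n, -1, -1)'; the k = 0 fall-through returns (0, []) either way
def pvAGo (durations : List Int) (budget : Int) : Nat → Int × List Int
  | 0 => match pvFindK durations budget 0 with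
         | some c => (0, c)
         | none => (0, [])
  | k + 1 => match pvFindK durations budget (k + 1) with
         | some c => ((k : Int) + 1, c)
         | none => pvAGo durations budget k

def brute_force_max_count (durations : List Int) (budget : Int) : Int × List Int :=
  pvAGo durations budget durations.length

-- ===== PORT B =====
-- sum(sorted(xs)[:m])
def pvMinTake (xs : List Int) (m : Nat) : Int :=
  ((PySem.List.sorted xs (fun x => x) false).take m).sum

-- sums = [0]; pre = 0; for d in sorted(durations): pre += d; sums.append(pre)
def pvSums (durations : List Int) : List Int :=
  ((PySem.List.sorted durations (fun x => x) false).foldl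
    (fun st d => (st.1 + d, st.2 ++ [st.1 + d])) ((0 : Int), [(0 : Int)])).2

-- k = 0; for m in range(n, -1, -1): if sums[m] <= budget: k = m; break
-- (the m = 0 iteration assigns k its default 0, so it is the base case's value)
def pvBK (sums : List Int) (budget : Int) : Nat → Nat
  | 0 => 0
  | m + 1 => if sums.getD (m + 1) 0 ≤ budget then m + 1 else pvBK sums budget m

-- the greedy while-loop over the shrinking suffix with counters i, total, need
def pvGreedy (budget : Int) : List Int → Int → Int → Nat → List Int
  | _, _, _, 0 => []
  | [], _, _, _ + 1 => []
  | d :: suffix, i, total, need + 1 =>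
    if total + d + pvMinTake suffix need ≤ budget then
      i :: pvGreedy budget suffix (i + 1) (total + d) need
    else
      pvGreedy budget suffix (i + 1) total (need + 1)

def brute_force_max_count_alt (durations : List Int) (budget : Int) : Int × List Int :=
  let k := pvBK (pvSums durations) budget durations.length
  if k = 0 then (0, []) else ((k : Int), pvGreedy budget durations 0 0 k)

-- ===== PRECONDITION & SPEC =====
def Spec_brute_force_max_count (durations : List Int) (budget : Int) (out : Int × List Int) : Prop := out = brute_force_max_count_alt durations budget
instance (durations : List Int) (budget : Int) (out : Int × List Int) : Decidable (Spec_brute_force_max_count durations budget out) := by unfold Spec_brute_force_max_count; infer_instance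

-- ===== CLAIM (what is proved, stated in full; the proofs are below) =====
def Claim_equal_brute_force_max_count : Prop := ∀ (durations : List Int) (budget : Int), Dom_brute_force_max_count durations budget → Spec_brute_force_max_count durations budget (brute_force_max_count durations budget)

-- ===== LEMMAS AND PROOFS =====

-- pvCombos is natural in map
theorem pvCombos_map {α β : Type} (f : α → β) (l : List α) :
    ∀ k, pvCombos (l.map f) k = (pvCombos l k).map (List.map f) := by
  induction l with
  | nil => intro k; cases k <;> simp [pvCombos]
  | cons x xs ih =>
    intro k
    cases k with
    | zero => simp [pvCombos]
    | succ k =>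
      simp only [List.map_cons, pvCombos, ih, List.map_append, List.map_map]
      rfl

-- membership in pvCombos = length-k sublists
theorem mem_pvCombos {α : Type} (l : List α) :
    ∀ (k : Nat) (c : List α), c ∈ pvCombos l k ↔ c.Sublist l ∧ c.length = k := by
  induction l with
  | nil =>
    intro k c
    cases k <;> simp [pvCombos, List.sublist_nil] <;> rintro rfl <;> simp
  | cons x xs ih =>
    intro k c
    cases k with
    | zero =>
      simp only [pvCombos, List.mem_singleton]
      constructor
      · rintro rfl; exact ⟨List.nil_sublist _, rfl⟩
      · rintro ⟨_, hl⟩; exact List.length_eq_zero_iff.1 hl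
    | succ k =>
      simp only [pvCombos, List.mem_append, List.mem_map]
      constructor
      · rintro (⟨c', hc', rfl⟩ | hc)
        · obtain ⟨hs, hl⟩ := (ih k c').1 hc'
          exact ⟨List.Sublist.cons₂ _ hs, by simp [hl]⟩
        · obtain ⟨hs, hl⟩ := (ih (k + 1) c).1 hc
          exact ⟨hs.cons _, hl⟩
      · rintro ⟨hs, hl⟩
        cases hs with
        | cons _ h => exact Or.inr ((ih (k + 1) c).2 ⟨h, hl⟩)
        | cons₂ _ h =>
          rename_i c'
          exact Or.inl ⟨c', (ih k c').2 ⟨h, by simpa using hl⟩, rfl⟩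

-- shifting the head of a sorted list into a take can only decrease the sum
theorem take_sum_cons_le (a : Int) (t : List Int) (m : Nat)
    (hs : (a :: t).Pairwise (· ≤ ·)) (hm : m ≤ t.length) :
    ((a :: t).take m).sum ≤ (t.take m).sum := by
  cases m with
  | zero => simp
  | succ m =>
    have hm' : m < t.length := hm
    rw [List.take_succ_cons, List.take_add_one, List.getElem?_eq_getElem hm']
    simp only [List.sum_cons, List.sum_append, Option.toList_some, List.sum_nil]
    have ha : a ≤ t[m] := (List.pairwise_cons.1 hs).1 _ (List.getElem_mem hm')
    omega

-- a sorted list's take-|s| prefix has the least sum among its sublists s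
theorem sorted_take_sum_le (t : List Int) : ∀ (s : List Int), s.Sublist t →
    t.Pairwise (· ≤ ·) → (t.take s.length).sum ≤ s.sum := by
  intro s hs
  induction hs with
  | slnil => intro _; simp
  | cons a h ih =>
    intro hp
    exact le_trans (take_sum_cons_le a _ _ hp h.length_le) (ih hp.of_cons)
  | cons₂ a h ih =>
    intro hp
    simp only [List.length_cons, List.take_succ_cons, List.sum_cons]
    have := ih hp.of_cons
    omega

-- any length-k combination of l sums to at least the k smallest elements of l
theorem pvCombos_sum_lb (l : List Int) (k : Nat) (s : List Int)
    (hs : s ∈ pvCombos l k) : pvMinTake l k ≤ s.sum := by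
  obtain ⟨hsub, hlen⟩ := (mem_pvCombos l k s).1 hs
  have hperm : (PySem.List.sorted l (fun x => x) false).Perm l :=
    PySem.List.sorted_perm l (fun x => x) false
  obtain ⟨u, hup, hus⟩ := hsub.subperm.trans hperm.symm.subperm
  have hpw : (PySem.List.sorted l (fun x => x) false).Pairwise (· ≤ ·) := by
    simpa using PySem.List.sorted_pairwise l (fun x => x)
  have h1 := sorted_take_sum_le _ u hus hpw
  rw [hup.length_eq, hlen, hup.sum_eq] at h1
  exact h1

-- the k smallest elements of l are realised by some combination
theorem pvCombos_min_exists (l : List Int) (k : Nat) (hk : k ≤ l.length) :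
    ∃ s ∈ pvCombos l k, s.sum = pvMinTake l k := by
  have hperm : (PySem.List.sorted l (fun x => x) false).Perm l :=
    PySem.List.sorted_perm l (fun x => x) false
  obtain ⟨u, hup, hus⟩ :=
    (List.take_sublist k _).subperm.trans hperm.subperm
  have hlt : (PySem.List.sorted l (fun x => x) false).length = l.length :=
    PySem.List.length_sorted l (fun x => x) false
  have hlen : u.length = k := by
    rw [hup.length_eq, List.length_take]
    omega
  exact ⟨u, (mem_pvCombos l k u).2 ⟨hus, hlen⟩, by rw [hup.sum_eq]; rfl⟩

-- feasibility of some k-combination ↔ the k cheapest fit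
theorem pvCombos_feasible_iff (l : List Int) (k : Nat) (b : Int) :
    (∃ s ∈ pvCombos l k, s.sum ≤ b) ↔ (k ≤ l.length ∧ pvMinTake l k ≤ b) := by
  constructor
  · rintro ⟨s, hs, hb⟩
    obtain ⟨hsub, hlen⟩ := (mem_pvCombos l k s).1 hs
    exact ⟨hlen ▸ hsub.length_le, le_trans (pvCombos_sum_lb l k s hs) hb⟩
  · rintro ⟨hk, hb⟩
    obtain ⟨s, hs, hsum⟩ := pvCombos_min_exists l k hk
    exact ⟨s, hs, hsum ▸ hb⟩

-- find? only looks at members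
theorem find?_congr_mem {α : Type} (l : List α) (p q : α → Bool)
    (h : ∀ x ∈ l, p x = q x) : l.find? p = l.find? q := by
  induction l with
  | nil => simp
  | cons x xs ih =>
    simp only [List.find?_cons]
    rw [h x (List.mem_cons_self)]
    cases q x
    · exact ih fun y hy => h y (List.mem_cons_of_mem _ hy)
    · rfl

-- proof-side greedy on (index, value) pairs
def gP (b : Int) : List (Int × Int) → Nat → List (Int × Int)
  | _, 0 => []
  | [], _ + 1 => []
  | (i, d) :: rest, need + 1 =>
    if d + pvMinTake (rest.map Prod.snd) need ≤ b then
      (i, d) :: gP (b - d) rest need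
    else
      gP b rest (need + 1)

-- feasibility over pair lists
theorem pvCombos_pairs_feasible_iff (pl : List (Int × Int)) (k : Nat) (b : Int) :
    (∃ pc ∈ pvCombos pl k, (pc.map Prod.snd).sum ≤ b) ↔
      (k ≤ pl.length ∧ pvMinTake (pl.map Prod.snd) k ≤ b) := by
  have hmap := pvCombos_map Prod.snd pl k
  have := pvCombos_feasible_iff (pl.map Prod.snd) k b
  rw [hmap, List.length_map] at this
  rw [← this]
  constructor
  · rintro ⟨pc, hpc, hb⟩; exact ⟨pc.map Prod.snd, List.mem_map_of_mem hpc, hb⟩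
  · rintro ⟨s, hs, hb⟩
    obtain ⟨pc, hpc, rfl⟩ := List.mem_map.1 hs
    exact ⟨pc, hpc, hb⟩

-- MAIN: the first feasible combination in itertools order is the greedy one
theorem find?_combos_eq_gP : ∀ (pl : List (Int × Int)) (need : Nat) (b : Int),
    (∃ pc ∈ pvCombos pl need, (pc.map Prod.snd).sum ≤ b) →
    (pvCombos pl need).find? (fun pc => decide ((pc.map Prod.snd).sum ≤ b)) =
      some (gP b pl need) := by
  intro pl
  induction pl with
  | nil =>
    intro need b hfeas
    cases need with
    | zero =>
      obtain ⟨pc, hpc, hb⟩ := hfeas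
      simp only [pvCombos, List.mem_singleton] at hpc
      subst hpc
      simp only [List.map_nil, List.sum_nil] at hb
      simp [pvCombos, gP, hb]
    | succ need => simp [pvCombos] at hfeas
  | cons hd rest ih =>
    intro need b hfeas
    obtain ⟨i, d⟩ := hd
    cases need with
    | zero =>
      obtain ⟨pc, hpc, hb⟩ := hfeas
      simp only [pvCombos, List.mem_singleton] at hpc
      subst hpc
      simp only [List.map_nil, List.sum_nil] at hb
      simp [pvCombos, gP, hb]
    | succ need =>
      have hlen : need + 1 ≤ rest.length + 1 := by
        obtain ⟨pc, hpc, _⟩ := hfeas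
        obtain ⟨hsub, hl⟩ := (mem_pvCombos _ _ _).1 hpc
        have h2 := hsub.length_le
        rw [hl] at h2
        simpa using h2
      show (((pvCombos rest need).map (fun c => (i, d) :: c) ++
              pvCombos rest (need + 1)).find? _) = _
      rw [List.find?_append, List.find?_map]
      by_cases hc : d + pvMinTake (rest.map Prod.snd) need ≤ b
      · have hfr : ∃ pc ∈ pvCombos rest need, (pc.map Prod.snd).sum ≤ b - d :=
          (pvCombos_pairs_feasible_iff rest need (b - d)).2 ⟨by omega, by omega⟩
        have hcong : ∀ pc ∈ pvCombos rest need,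
            ((fun pc => decide ((List.map Prod.snd pc).sum ≤ b)) ∘ (fun c => (i, d) :: c)) pc
              = (fun pc => decide ((List.map Prod.snd pc).sum ≤ b - d)) pc := by
          intro pc _
          simp only [Function.comp, List.map_cons, List.sum_cons]
          exact decide_eq_decide.2 (by omega)
        rw [find?_congr_mem _ _ _ hcong, ih need (b - d) hfr]
        simp [gP, hc]
      · have hnone : (pvCombos rest need).find?
            ((fun pc => decide ((List.map Prod.snd pc).sum ≤ b)) ∘ (fun c => (i, d) :: c)) = none := by
          rw [List.find?_eq_none]
          intro pc hpc
          have hlb : pvMinTake (rest.map Prod.snd) need ≤ (pc.map Prod.snd).sum :=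
            pvCombos_sum_lb (rest.map Prod.snd) need (pc.map Prod.snd)
              (by rw [pvCombos_map]; exact List.mem_map_of_mem hpc)
          simp only [Function.comp, List.map_cons, List.sum_cons, decide_eq_true_eq]
          omega
        have hfr : ∃ pc ∈ pvCombos rest (need + 1), (pc.map Prod.snd).sum ≤ b := by
          obtain ⟨pc, hpc, hb⟩ := hfeas
          simp only [pvCombos, List.mem_append, List.mem_map] at hpc
          rcases hpc with ⟨c', hc', rfl⟩ | h2
          · exfalso
            have hlb : pvMinTake (rest.map Prod.snd) need ≤ (c'.map Prod.snd).sum :=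
              pvCombos_sum_lb (rest.map Prod.snd) need (c'.map Prod.snd)
                (by rw [pvCombos_map]; exact List.mem_map_of_mem hc')
            simp only [List.map_cons, List.sum_cons] at hb
            omega
          · exact ⟨pc, h2, hb⟩
        rw [hnone, ih (need + 1) b hfr]
        simp [gP, hc]

-- the port's greedy = index part of gP over the enumerated suffix
theorem pvGreedy_eq_gP : ∀ (l : List Int) (i total b : Int) (need : Nat),
    pvGreedy b l i total need = (gP (b - total) (PySem.List.enumerate l i) need).map Prod.fst := by
  intro l
  induction l with
  | nil =>
    intro i total b need
    cases need <;> simp [pvGreedy, PySem.List.enumerate_nil, gP]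
  | cons d rest ih =>
    intro i total b need
    cases need with
    | zero => simp [pvGreedy, gP]
    | succ need =>
      rw [PySem.List.enumerate_cons]
      simp only [pvGreedy, gP, PySem.List.map_snd_enumerate]
      by_cases hc : total + d + pvMinTake rest need ≤ b
      · rw [if_pos hc, if_pos (by omega), List.map_cons]
        rw [ih, sub_sub]
      · rw [if_neg hc, if_neg (by omega)]
        exact ih (i + 1) total b (need + 1)

-- the prefix-sum fold, generalized over its accumulator
theorem pvSums_foldl : ∀ (l : List Int) (p : Int) (a : List Int),
    (l.foldl (fun st d => (st.1 + d, st.2 ++ [st.1 + d])) (p, a)).2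
      = a ++ (List.range l.length).map (fun m => p + (l.take (m + 1)).sum) := by
  intro l
  induction l with
  | nil => intro p a; simp
  | cons d rest ih =>
    intro p a
    rw [List.foldl_cons]
    show (rest.foldl _ (p + d, a ++ [p + d])).2 = _
    rw [ih (p + d) (a ++ [p + d]), List.length_cons, List.range_succ_eq_map,
        List.map_cons, List.map_map, List.append_assoc]
    congr 1
    simp [Function.comp_def, List.take_succ_cons, add_assoc]

-- the prefix-sum list built by B's fold
theorem pvSums_getD (durations : List Int) (m : Nat) (hm : m ≤ durations.length) :
    (pvSums durations).getD m 0 = pvMinTake durations m := by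
  unfold pvSums pvMinTake
  rw [pvSums_foldl]
  have hl : (PySem.List.sorted durations (fun x => x) false).length = durations.length :=
    PySem.List.length_sorted durations (fun x => x) false
  cases m with
  | zero => simp
  | succ m =>
    have hm' : m < durations.length := hm
    rw [List.getD_eq_getElem?_getD, List.getElem?_append_right (by simp)]
    simp [hl, hm']

-- main loop alignment
theorem pvAGo_eq (durations : List Int) (budget : Int) : ∀ (j : Nat), j ≤ durations.length →
    pvAGo durations budget j =
      (let k := pvBK (pvSums durations) budget j;
       if k = 0 then (0, []) else ((k : Int), pvGreedy budget durations 0 0 k)) := by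
  intro j
  induction j with
  | zero =>
    by_cases h0 : (0 : Int) ≤ budget <;>
      simp [pvAGo, pvFindK, pvCombos, pvSumAt, pvBK, List.find?, h0]
  | succ j ih =>
    intro hj
    have hn : j + 1 ≤ durations.length := hj
    have hsnd : (PySem.List.enumerate durations 0).map Prod.snd = durations :=
      PySem.List.map_snd_enumerate durations 0
    have hlenE : (PySem.List.enumerate durations 0).length = durations.length :=
      PySem.List.length_enumerate durations 0
    have hval : ∀ pc ∈ pvCombos (PySem.List.enumerate durations 0) (j + 1),
        ((fun c => decide (pvSumAt durations c ≤ budget)) ∘ List.map Prod.fst) pc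
          = (fun pc => decide ((List.map Prod.snd pc).sum ≤ budget)) pc := by
      intro pc hpc
      obtain ⟨hsub, _⟩ := (mem_pvCombos _ _ _).1 hpc
      have hs : pvSumAt durations (pc.map Prod.fst) = (pc.map Prod.snd).sum := by
        unfold pvSumAt
        rw [List.map_map]
        congr 1
        apply List.map_congr_left
        intro x hx
        obtain ⟨k, hk, rfl⟩ := (PySem.List.mem_enumerate_iff _ _ _).1 (hsub.subset hx)
        simp [PySem.List.pyGetD_natCast, List.getD_eq_getElem?_getD,
          List.getElem?_eq_getElem hk]
      simp only [Function.comp_apply, hs]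
    have hfind : pvFindK durations budget (j + 1)
        = ((pvCombos (PySem.List.enumerate durations 0) (j + 1)).find?
            (fun pc => decide ((List.map Prod.snd pc).sum ≤ budget))).map (List.map Prod.fst) := by
      unfold pvFindK
      have hfst : PySem.List.pyRange 0 (durations.length : Int) 1
          = (PySem.List.enumerate durations 0).map Prod.fst := by
        rw [PySem.List.map_fst_enumerate]
        norm_num
      rw [hfst, pvCombos_map, List.find?_map, find?_congr_mem _ _ _ hval]
    have hgd : (pvSums durations).getD (j + 1) 0 = pvMinTake durations (j + 1) :=
      pvSums_getD durations (j + 1) hn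
    by_cases hb : pvMinTake durations (j + 1) ≤ budget
    · have hfeas : ∃ pc ∈ pvCombos (PySem.List.enumerate durations 0) (j + 1),
          (pc.map Prod.snd).sum ≤ budget :=
        (pvCombos_pairs_feasible_iff _ _ _).2
          ⟨by rw [hlenE]; exact hn, by rw [hsnd]; exact hb⟩
      rw [find?_combos_eq_gP _ (j + 1) budget hfeas] at hfind
      have hg : pvGreedy budget durations 0 0 (j + 1)
          = (gP budget (PySem.List.enumerate durations 0) (j + 1)).map Prod.fst := by
        rw [pvGreedy_eq_gP]
        norm_num
      show (match pvFindK durations budget (j + 1) with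
            | some c => ((j : Int) + 1, c)
            | none => pvAGo durations budget j) = _
      rw [hfind]
      simp only [Option.map_some]
      have hbk : pvBK (pvSums durations) budget (j + 1) = j + 1 := by
        show (if (pvSums durations).getD (j + 1) 0 ≤ budget then j + 1
              else pvBK (pvSums durations) budget j) = j + 1
        rw [hgd, if_pos hb]
      show ((j : Int) + 1, List.map Prod.fst (gP budget (PySem.List.enumerate durations 0) (j + 1)))
          = (if pvBK (pvSums durations) budget (j + 1) = 0 then ((0 : Int), ([] : List Int))
             else ((pvBK (pvSums durations) budget (j + 1) : Int),
               pvGreedy budget durations 0 0 (pvBK (pvSums durations) budget (j + 1))))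
      rw [hbk, if_neg (Nat.succ_ne_zero j), hg]
      push_cast
      rfl
    · have hnone : (pvCombos (PySem.List.enumerate durations 0) (j + 1)).find?
          (fun pc => decide ((List.map Prod.snd pc).sum ≤ budget)) = none := by
        rw [List.find?_eq_none]
        intro pc hpc
        have hlb : pvMinTake durations (j + 1) ≤ (pc.map Prod.snd).sum := by
          have := pvCombos_sum_lb ((PySem.List.enumerate durations 0).map Prod.snd)
            (j + 1) (pc.map Prod.snd)
            (by rw [pvCombos_map]; exact List.mem_map_of_mem hpc)
          rwa [hsnd] at this
        simp only [decide_eq_true_eq]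
        omega
      rw [hnone] at hfind
      show (match pvFindK durations budget (j + 1) with
            | some c => ((j : Int) + 1, c)
            | none => pvAGo durations budget j) = _
      rw [hfind]
      simp only [Option.map_none]
      rw [ih (by omega)]
      have hbk : pvBK (pvSums durations) budget (j + 1) = pvBK (pvSums durations) budget j := by
        show (if (pvSums durations).getD (j + 1) 0 ≤ budget then j + 1
              else pvBK (pvSums durations) budget j) = _
        rw [hgd, if_neg hb]
      simp only [hbk]

-- ===== VERDICT (by name: the statement is the Claim_ definition above) =====
theorem brute_force_max_count_spec : Claim_equal_brute_force_max_count := by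
  intro durations budget _
  unfold Spec_brute_force_max_count brute_force_max_count brute_force_max_count_alt
  exact pvAGo_eq durations budget durations.length le_rfl
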